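-- pv_equiv track=rewrite | github.com/Akobabs/InsiderThreatDetection | graph_emb/utils.py | partition_dictionary
-- ===== SOURCE A (Python) =====
-- def partition_dictionary(items, num_workers):
--     """Partition a dictionary into chunks for parallel processing."""
--     batch_size = (len(items) - 1) // num_workers + 1
--     partitions = []
--     current_partition = []
--     count = 0
--     for key, value in items.items():
--         current_partition.append((key, value))
--         count += 1
--         if count % batch_size == 0:
--             partitions.append(current_partition)
--             current_partition = []
--     if current_partition:
--         partitions.append(current_partition)
--     return partitions
-- ===== SOURCE B (Python) =====
-- def partition_dictionary(items, num_workers):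
--     """Partition a dictionary into chunks for parallel processing."""
--     pairs = list(items.items())
--     if not pairs:
--         return []
--     batch_size = (len(pairs) - 1) // num_workers + 1
--     return [pairs[i:i + batch_size] for i in range(0, len(pairs), batch_size)]
-- ===== Notes on version B (the rewrite author's own statement) =====
-- stated objective: simpler
-- what changed: Replaces the running counter, modulo flush test and explicit leftover flush with a single index-stride pass: materialize the pairs once and slice them at offsets 0, batch_size, 2*batch_size, ...
-- outside the precondition, e.g. on partition_dictionary({'a': 1, 'b': 2, 'c': 3}, -1): A returns [[('a', 1)], [('b', 2)], [('c', 3)]], B returns []; on partition_dictionary({'a': 1}, 0): A raises ZeroDivisionError, B raises ZeroDivisionError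
import Mathlib
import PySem

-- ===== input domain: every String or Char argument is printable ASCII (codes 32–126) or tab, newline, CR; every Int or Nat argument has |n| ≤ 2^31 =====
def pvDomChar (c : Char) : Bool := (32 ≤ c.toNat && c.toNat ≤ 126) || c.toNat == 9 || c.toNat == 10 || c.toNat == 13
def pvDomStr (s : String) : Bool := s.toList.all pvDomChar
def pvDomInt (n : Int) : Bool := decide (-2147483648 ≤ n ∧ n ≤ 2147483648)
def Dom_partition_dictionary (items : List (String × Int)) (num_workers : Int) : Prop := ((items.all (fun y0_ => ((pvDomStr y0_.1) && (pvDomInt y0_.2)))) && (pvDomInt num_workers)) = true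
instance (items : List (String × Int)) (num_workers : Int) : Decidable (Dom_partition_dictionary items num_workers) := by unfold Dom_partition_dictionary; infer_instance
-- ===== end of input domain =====

-- B replaces A's running counter + modulo flush with one index-stride slicing pass (objective: simpler).


-- ===== PORT A =====
def partition_dictionary (items : List (String × Int)) (num_workers : Int) : List (List (String × Int)) :=
  let batch_size : Int := PySem.Int.floordiv ((items.length : Int) - 1) num_workers + 1
  let st :=
    items.foldl
      (fun (st : List (List (String × Int)) × List (String × Int) × Int) kv =>
        let current_partition := st.2.1 ++ [kv]
        let count := st.2.2 + 1
        if PySem.Int.mod count batch_size = 0 then (st.1 ++ [current_partition], [], count)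
        else (st.1, current_partition, count))
      ([], [], 0)
  if st.2.1.isEmpty then st.1 else st.1 ++ [st.2.1]

-- ===== PORT B =====
def partition_dictionary_alt (items : List (String × Int)) (num_workers : Int) : List (List (String × Int)) :=
  if items.isEmpty then []
  else
    let batch_size : Int := PySem.Int.floordiv ((items.length : Int) - 1) num_workers + 1
    (PySem.List.pyRange 0 (items.length : Int) batch_size).map
      (fun i => PySem.List.slice items (some i) (some (i + batch_size)))

-- ===== PRECONDITION & SPEC =====
-- Pre_ excludes num_workers ≤ 0 (not a meaningful worker count): num_workers = 0 makes A raise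
-- ZeroDivisionError, and a negative num_workers makes batch_size non-positive, where A either raises
-- (batch_size 0) or chunks by the absolute value as an accident of Python's modulo, while B returns [].
def Pre_partition_dictionary (items : List (String × Int)) (num_workers : Int) : Prop :=
  1 ≤ num_workers
instance (items : List (String × Int)) (num_workers : Int) : Decidable (Pre_partition_dictionary items num_workers) := by unfold Pre_partition_dictionary; infer_instance

def pvWitness_partition_dictionary : (List (String × Int)) × Int := ([("a", 1), ("b", 2), ("c", 3)], 2)

def Spec_partition_dictionary (items : List (String × Int)) (num_workers : Int) (out : List (List (String × Int))) : Prop := out = partition_dictionary_alt items num_workers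
instance (items : List (String × Int)) (num_workers : Int) (out : List (List (String × Int))) : Decidable (Spec_partition_dictionary items num_workers out) := by unfold Spec_partition_dictionary; infer_instance

-- ===== CLAIM (what is proved, stated in full; the proofs are below) =====
def Claim_equal_partition_dictionary : Prop := ∀ (items : List (String × Int)) (num_workers : Int), Dom_partition_dictionary items num_workers → Pre_partition_dictionary items num_workers → Spec_partition_dictionary items num_workers (partition_dictionary items num_workers)

-- ===== LEMMAS AND PROOFS =====

-- Reference chunking: split xs into consecutive blocks of B elements (last one possibly shorter).
def pvChunks (B : Nat) (xs : List (String × Int)) : List (List (String × Int)) :=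
  if h : xs = [] ∨ B = 0 then [] else xs.take B :: pvChunks B (xs.drop B)
  termination_by xs.length
  decreasing_by
    rcases not_or.mp h with ⟨hx, hB⟩
    have : 0 < xs.length := List.length_pos_iff.mpr hx
    simp [List.length_drop]; omega

-- A's loop with a partially filled current chunk `cur` (cur.length < B elements so far).
def pvChunkFrom (B : Nat) (cur : List (String × Int)) (xs : List (String × Int)) : List (List (String × Int)) :=
  match xs with
  | [] => if cur.isEmpty then [] else [cur]
  | x :: xs' =>
      if cur.length + 1 = B then (cur ++ [x]) :: pvChunkFrom B [] xs'
      else pvChunkFrom B (cur ++ [x]) xs'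

theorem pvChunkFrom_eq_chunks (B : Nat) (hB : 0 < B) :
    ∀ (xs cur : List (String × Int)), cur.length < B → pvChunkFrom B cur xs = pvChunks B (cur ++ xs) := by
  intro xs
  induction xs with
  | nil =>
      intro cur hcur
      by_cases hc : cur = []
      · subst hc; simp [pvChunkFrom, pvChunks]
      · have h3 : pvChunkFrom B cur [] = [cur] := by simp [pvChunkFrom, hc]
        rw [h3, List.append_nil, pvChunks, dif_neg (not_or.mpr ⟨hc, by omega⟩),
            List.take_of_length_le (by omega), List.drop_eq_nil_of_le (by omega),
            pvChunks, dif_pos (Or.inl rfl)]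
  | cons x xs' ih =>
      intro cur hcur
      rw [pvChunkFrom]
      by_cases hfull : cur.length + 1 = B
      · rw [if_pos hfull, ih [] (by simpa using hB)]
        have heq : cur ++ x :: xs' = (cur ++ [x]) ++ xs' := by simp
        rw [heq]
        have hR : pvChunks B ((cur ++ [x]) ++ xs') =
            ((cur ++ [x]) ++ xs').take B :: pvChunks B (((cur ++ [x]) ++ xs').drop B) := by
          rw [pvChunks, dif_neg (not_or.mpr ⟨by simp, by omega⟩)]
        rw [hR, List.take_append_of_le_length (by simp; omega),
            List.drop_append_of_le_length (by simp; omega),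
            List.take_of_length_le (by simp; omega), List.drop_eq_nil_of_le (by simp; omega)]
      · rw [if_neg hfull, ih (cur ++ [x]) (by simp; omega)]
        simp

-- The fold in A's port computes pvChunkFrom.
theorem pvFoldA (b : Int) (hb : 1 ≤ b) :
    ∀ (xs : List (String × Int)) (parts : List (List (String × Int))) (cur : List (String × Int)) (c : Int),
      0 ≤ c → PySem.Int.mod c b = (cur.length : Int) →
      (let st :=
        xs.foldl
          (fun (st : List (List (String × Int)) × List (String × Int) × Int) kv =>
            let current_partition := st.2.1 ++ [kv]
            let count := st.2.2 + 1
            if PySem.Int.mod count b = 0 then (st.1 ++ [current_partition], [], count)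
            else (st.1, current_partition, count))
          (parts, cur, c)
       if st.2.1.isEmpty then st.1 else st.1 ++ [st.2.1]) =
      parts ++ pvChunkFrom b.toNat cur xs := by
  intro xs
  induction xs with
  | nil =>
      intro parts cur c hc hmod
      by_cases hcur : cur = [] <;> simp [pvChunkFrom, hcur]
  | cons x xs' ih =>
      intro parts cur c hc hmod
      have hbpos : (0:Int) < b := by omega
      have hmod' : PySem.Int.mod c b = c % b := PySem.Int.mod_eq_emod_of_pos hbpos
      have hcurlt : (cur.length : Int) < b := by
        rw [← hmod, hmod']; exact Int.emod_lt_of_pos c hbpos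
      have hstep : PySem.Int.mod (c + 1) b = if (cur.length : Int) + 1 = b then 0 else (cur.length : Int) + 1 := by
        rw [PySem.Int.mod_eq_emod_of_pos hbpos]
        have hcl : (cur.length : Int) = c % b := by rw [← hmod, hmod']
        have hdecomp : c = b * (c / b) + (cur.length : Int) := by
          rw [hcl]; exact (Int.mul_ediv_add_emod c b).symm
        by_cases hfull : (cur.length : Int) + 1 = b
        · rw [if_pos hfull]
          have h1 : c + 1 = b * (c / b + 1) := by linear_combination hdecomp + hfull
          rw [h1]; exact Int.mul_emod_right b _
        · rw [if_neg hfull]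
          have h1 : c + 1 = ((cur.length : Int) + 1) + b * (c / b) := by linear_combination hdecomp
          rw [h1, Int.add_mul_emod_self_left]
          exact Int.emod_eq_of_lt (by omega) (by omega)
      simp only [List.foldl_cons]
      by_cases hfull : (cur.length : Int) + 1 = b
      · have hif : PySem.Int.mod (c + 1) b = 0 := by rw [hstep, if_pos hfull]
        simp only [hif, if_true]
        rw [ih (parts ++ [cur ++ [x]]) [] (c+1) (by omega) (by simpa using hif)]
        rw [pvChunkFrom]
        rw [if_pos (by omega : cur.length + 1 = b.toNat)]
        simp
      · have hif : ¬ (PySem.Int.mod (c + 1) b = 0) := by rw [hstep, if_neg hfull]; omega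
        simp only [hif, if_false]
        rw [ih parts (cur ++ [x]) (c+1) (by omega) (by rw [hstep, if_neg hfull]; simp)]
        rw [pvChunkFrom, if_neg (by omega : ¬ (cur.length + 1 = b.toNat))]

-- Nat-level form of B's slicing comprehension.
theorem pvMapRange (B : Nat) (hB : 0 < B) :
    ∀ (xs : List (String × Int)),
      (List.range ((xs.length + B - 1) / B)).map (fun k => (xs.drop (B * k)).take B) = pvChunks B xs := by
  intro xs
  induction hN : xs.length using Nat.strong_induction_on generalizing xs with
  | _ N ih =>
    subst hN
    by_cases hx : xs = []
    · subst hx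
      rw [pvChunks, dif_pos (Or.inl rfl)]
      have h0 : (List.length ([] : List (String × Int)) + B - 1) / B = 0 := Nat.div_eq_of_lt (by simp; omega)
      simp
      omega
    · set N := xs.length with hNdef
      have hNpos : 0 < N := List.length_pos_iff.mpr hx
      have hcnt : (N + B - 1) / B = (N - 1) / B + 1 := by
        have h1 : N + B - 1 = (N - 1) + 1 * B := by omega
        rw [h1, Nat.add_mul_div_right _ _ hB]
      have hcnt' : ((xs.drop B).length + B - 1) / B = (N - 1) / B := by
        rw [List.length_drop, ← hNdef]
        by_cases hle : N ≤ B
        · have h1 : (N - B + B - 1) / B = 0 := Nat.div_eq_of_lt (by omega)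
          have h2 : (N - 1) / B = 0 := Nat.div_eq_of_lt (by omega)
          rw [h1, h2]
        · have h1 : N - B + B - 1 = (N - 1 - B) + 1 * B := by omega
          rw [h1, Nat.add_mul_div_right _ _ hB]
          have h2 : N - 1 = (N - 1 - B) + 1 * B := by omega
          conv_rhs => rw [h2, Nat.add_mul_div_right _ _ hB]
      rw [hcnt, List.range_succ_eq_map]
      rw [pvChunks, dif_neg (not_or.mpr ⟨hx, by omega⟩)]
      simp only [List.map_cons, Nat.mul_zero, List.drop_zero, List.map_map]
      congr 1
      rw [← ih (xs.drop B).length (by rw [List.length_drop, ← hNdef]; omega) (xs.drop B) rfl, hcnt']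
      apply List.map_congr_left
      intro k _
      simp only [Function.comp_apply]
      rw [List.drop_drop]
      congr 2
      simp [Nat.mul_succ, Nat.add_comm]

theorem pvAltChunks (items : List (String × Int)) (b : Int) (hb : 1 ≤ b) (hne : items ≠ []) :
    (PySem.List.pyRange 0 (items.length : Int) b).map
      (fun i => PySem.List.slice items (some i) (some (i + b))) = pvChunks b.toNat items := by
  have hBpos : 0 < b.toNat := by omega
  have hbb : ((b.toNat : Int)) = b := Int.toNat_of_nonneg (by omega)
  have hNpos : 0 < items.length := List.length_pos_iff.mpr hne
  rw [PySem.List.pyRange_of_pos _ _ (by omega : (0:Int) < b)]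
  rw [if_pos (by exact_mod_cast hNpos)]
  have hcast : ((items.length : Int) - 0 + b - 1) = ((items.length + b.toNat - 1 : Nat) : Int) := by
    push_cast [hbb]; omega
  have hdiv : (((items.length : Int) - 0 + b - 1) / b).toNat = (items.length + b.toNat - 1) / b.toNat := by
    rw [hcast]
    conv_lhs => rw [← hbb]
    rw [← Int.natCast_div, Int.toNat_natCast]
    rw [Int.toNat_natCast]
  rw [hdiv, List.map_map]
  rw [← pvMapRange b.toNat hBpos items]
  apply List.map_congr_left
  intro k _
  simp only [Function.comp_apply, zero_add]
  have h2 : b * (k : Int) + b = ((b.toNat * k : Nat) : Int) + ((b.toNat : Nat) : Int) := by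
    push_cast; rw [hbb]
  have h1 : b * (k : Int) = ((b.toNat * k : Nat) : Int) := by push_cast [hbb]; ring
  rw [h2, h1, PySem.List.slice_natCast_add]

-- ===== VERDICT (by name: the statement is the Claim_ definition above) =====
theorem partition_dictionary_spec : Claim_equal_partition_dictionary := by
  intro items num_workers _ hpre
  unfold Spec_partition_dictionary partition_dictionary partition_dictionary_alt
  have hw : (0:Int) < num_workers := hpre
  set b : Int := PySem.Int.floordiv ((items.length : Int) - 1) num_workers + 1 with hbdef
  by_cases hx : items = []
  · subst hx; simp
  · have hb : 1 ≤ b := by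
      rw [hbdef, PySem.Int.floordiv_eq_ediv_of_pos hw]
      have hlen : (0:Int) ≤ (items.length : Int) - 1 := by
        have : 0 < items.length := List.length_pos_iff.mpr hx
        omega
      have := Int.ediv_nonneg hlen (le_of_lt hw)
      omega
    rw [if_neg (show ¬(items.isEmpty = true) by simpa using hx)]
    have hA := pvFoldA b hb items [] [] 0 le_rfl (by simp [PySem.Int.mod])
    simp only [List.nil_append] at hA
    rw [hA, pvChunkFrom_eq_chunks b.toNat (by omega) items [] (by simpa using hb)]
    simp only [List.nil_append]
    exact (pvAltChunks items b hb hx).symm
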